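-- pv_equiv track=rewrite | github.com/songjein/TSE2020-79th-solution | util.py | text_change_post
-- ===== SOURCE A (Python) =====
-- def text_change_post(text, start_idx, end_idx, reverse_dict):
--     keys = list(reverse_dict.keys())
--     keys.sort()
--
--     # do not include end_idx for slice
--     slice_start = start_idx
--     slice_end = end_idx + 1
--
--     ranges = [] # slice index
--     tokens = [] # output tokens = 치환된 부분이랑 아닌 부분 구분한 서브스트링 리스트
--     is_replace = [] # is reversed from reverse dict
--     cur = 0
--     for key in keys:
--         # key = (pattern_start, pattern_end)
--         ranges.append((cur, key[0]))
--         tokens.append(text[cur:key[0]])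
--         is_replace.append(False)
--
--         new_word = reverse_dict[key]
--         ranges.append(key)
--         tokens.append(new_word)
--         is_replace.append(True)
--
--         cur = key[1]
--
--     # remaining string
--     ranges.append((cur, len(text)))
--     tokens.append(text[cur:])
--     is_replace.append(False)
--
--     selected = []
--     for i, (token_start, token_end) in enumerate(ranges):
--         token = tokens[i]
--         if slice_end <= token_start: # no overlap
--             continue
--         elif token_end <= slice_start: # no overlap
--             continue
--         elif is_replace[i]: # part of replace word
--             selected.append(token) # reverse dict의 replace 단어는 자르지 말기
--         else: # part of non replaced word
--             # get overlap index for token and selected index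
--             overlap_start = max(slice_start, token_start)
--             overlap_end = min(slice_end, token_end)
--             word = text[overlap_start: overlap_end]
--             selected.append(word)
--
--     output_string = ''.join(tokens)
--     selected_string = ''.join(selected)
--
--     return output_string, selected_string
-- ===== SOURCE B (Python) =====
-- def text_change_post(text, start_idx, end_idx, reverse_dict):
--     slice_start = start_idx
--     slice_end = end_idx + 1
--
--     out_parts = []
--     sel_parts = []
--
--     def plain(seg_start, seg_end, piece):
--         out_parts.append(piece)
--         if not (slice_end <= seg_start or seg_end <= slice_start):
--             sel_parts.append(text[max(slice_start, seg_start):min(slice_end, seg_end)])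
--
--     cur = 0
--     for key in sorted(reverse_dict):
--         plain(cur, key[0], text[cur:key[0]])
--         word = reverse_dict[key]
--         out_parts.append(word)
--         if not (slice_end <= key[0] or key[1] <= slice_start):
--             sel_parts.append(word)
--         cur = key[1]
--     plain(cur, len(text), text[cur:])
--
--     return ''.join(out_parts), ''.join(sel_parts)
-- ===== Notes on version B (the rewrite author's own statement) =====
-- stated objective: simpler
-- what changed: B replaces A's two-pass scheme (build parallel ranges/tokens/is_replace tables, then re-scan them by index for the selected slice) with one fused pass over the sorted keys that appends each segment's output piece and its selected piece directly.
import Mathlib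
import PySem

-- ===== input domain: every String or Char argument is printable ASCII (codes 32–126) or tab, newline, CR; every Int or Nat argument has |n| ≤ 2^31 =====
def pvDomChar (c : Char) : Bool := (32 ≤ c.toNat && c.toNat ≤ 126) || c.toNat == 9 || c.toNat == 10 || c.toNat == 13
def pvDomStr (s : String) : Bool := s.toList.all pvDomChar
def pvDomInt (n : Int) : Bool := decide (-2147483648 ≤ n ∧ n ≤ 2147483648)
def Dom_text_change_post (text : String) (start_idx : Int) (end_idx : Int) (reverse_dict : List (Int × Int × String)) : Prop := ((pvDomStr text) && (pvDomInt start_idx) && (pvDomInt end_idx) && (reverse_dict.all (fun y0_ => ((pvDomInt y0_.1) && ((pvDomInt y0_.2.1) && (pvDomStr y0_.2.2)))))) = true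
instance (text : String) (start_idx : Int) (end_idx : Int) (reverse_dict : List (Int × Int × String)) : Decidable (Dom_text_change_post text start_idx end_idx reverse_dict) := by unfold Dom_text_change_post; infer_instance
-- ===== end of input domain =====

-- B fuses A's table-building pass and its index re-scan into one pass over the sorted keys (objective: simpler); return values only.

-- ===== PORT A =====
-- first loop of A: builds the parallel lists (ranges, tokens, is_replace) from cursor `cur`
def pvBuildA (text : String) (d : PySem.Dict (Int × Int) String) :
    List (Int × Int) → Int → List (Int × Int) × List String × List Bool
  | [], cur =>
      ([(cur, (PySem.Str.len text : Int))], [PySem.Str.slice text (some cur) none], [false])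
  | (a, b) :: ks, cur =>
      let rest := pvBuildA text d ks b
      ((cur, a) :: (a, b) :: rest.1,
       PySem.Str.slice text (some cur) (some a) :: ((d.get? (a, b)).getD "") :: rest.2.1,
       false :: true :: rest.2.2)

-- second loop of A: scans ranges with tokens[i] / is_replace[i], collecting `selected`
def pvSelectA (text : String) (ss se : Int) :
    List (Int × Int) → List String → List Bool → List String
  | (ts, te) :: rr, tok :: tt, rep :: bb =>
      let rest := pvSelectA text ss se rr tt bb
      if se ≤ ts then rest
      else if te ≤ ss then rest
      else if rep then tok :: rest
      else PySem.Str.slice text (some (max ss ts)) (some (min se te)) :: rest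
  | _, _, _ => []

def text_change_post (text : String) (start_idx : Int) (end_idx : Int) (reverse_dict : List (Int × Int × String)) : String × String :=
  let d := PySem.Dict.ofList (reverse_dict.map fun kv => ((kv.1, kv.2.1), kv.2.2))
  let keys := PySem.List.sorted2 d.keys (fun k => k.1) (fun k => k.2)
  let built := pvBuildA text d keys 0
  (PySem.Str.join "" built.2.1,
   PySem.Str.join "" (pvSelectA text start_idx (end_idx + 1) built.1 built.2.1 built.2.2))

-- ===== PORT B =====
-- B's single loop: cursor over the sorted keys, emitting output pieces and selected pieces together
def pvGoB (text : String) (d : PySem.Dict (Int × Int) String) (ss se : Int) :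
    List (Int × Int) → Int → List String × List String
  | [], cur =>
      ([PySem.Str.slice text (some cur) none],
       if se ≤ cur ∨ (PySem.Str.len text : Int) ≤ ss then []
       else [PySem.Str.slice text (some (max ss cur)) (some (min se (PySem.Str.len text : Int)))])
  | (a, b) :: ks, cur =>
      let rest := pvGoB text d ss se ks b
      let gapSel := if se ≤ cur ∨ a ≤ ss then []
                    else [PySem.Str.slice text (some (max ss cur)) (some (min se a))]
      let word := (d.get? (a, b)).getD ""
      let wordSel := if se ≤ a ∨ b ≤ ss then [] else [word]
      (PySem.Str.slice text (some cur) (some a) :: word :: rest.1,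
       gapSel ++ wordSel ++ rest.2)

def text_change_post_alt (text : String) (start_idx : Int) (end_idx : Int) (reverse_dict : List (Int × Int × String)) : String × String :=
  let d := PySem.Dict.ofList (reverse_dict.map fun kv => ((kv.1, kv.2.1), kv.2.2))
  let keys := PySem.List.sorted2 d.keys (fun k => k.1) (fun k => k.2)
  let parts := pvGoB text d start_idx (end_idx + 1) keys 0
  (PySem.Str.join "" parts.1, PySem.Str.join "" parts.2)

-- ===== PRECONDITION & SPEC =====
def Spec_text_change_post (text : String) (start_idx : Int) (end_idx : Int) (reverse_dict : List (Int × Int × String)) (out : String × String) : Prop := out = text_change_post_alt text start_idx end_idx reverse_dict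
instance (text : String) (start_idx : Int) (end_idx : Int) (reverse_dict : List (Int × Int × String)) (out : String × String) : Decidable (Spec_text_change_post text start_idx end_idx reverse_dict out) := by unfold Spec_text_change_post; infer_instance

-- ===== CLAIM (what is proved, stated in full; the proofs are below) =====
def Claim_equal_text_change_post : Prop := ∀ (text : String) (start_idx : Int) (end_idx : Int) (reverse_dict : List (Int × Int × String)), Dom_text_change_post text start_idx end_idx reverse_dict → Spec_text_change_post text start_idx end_idx reverse_dict (text_change_post text start_idx end_idx reverse_dict)

-- ===== LEMMAS AND PROOFS =====
theorem pvAgree (text : String) (d : PySem.Dict (Int × Int) String) (ss se : Int) :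
    ∀ (keys : List (Int × Int)) (cur : Int),
      (pvBuildA text d keys cur).2.1 = (pvGoB text d ss se keys cur).1 ∧
      pvSelectA text ss se (pvBuildA text d keys cur).1 (pvBuildA text d keys cur).2.1
          (pvBuildA text d keys cur).2.2 = (pvGoB text d ss se keys cur).2 := by
  intro keys
  induction keys with
  | nil =>
      intro cur
      refine ⟨rfl, ?_⟩
      simp only [pvBuildA, pvGoB, pvSelectA]
      by_cases c1 : se ≤ cur <;> by_cases c2 : ((PySem.Str.len text : Int)) ≤ ss <;>
        simp [c1, c2]
  | cons k ks ih =>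
      intro cur
      obtain ⟨a, b⟩ := k
      obtain ⟨h1, h2⟩ := ih b
      simp only [pvBuildA, pvGoB]
      refine ⟨by rw [h1], ?_⟩
      simp only [pvSelectA]
      rw [h2]
      by_cases c1 : se ≤ cur <;> by_cases c2 : a ≤ ss <;> by_cases c3 : se ≤ a <;>
        by_cases c4 : b ≤ ss <;> simp [c1, c2, c3, c4]

-- ===== VERDICT (by name: the statement is the Claim_ definition above) =====
theorem text_change_post_spec : Claim_equal_text_change_post := by
  intro text start_idx end_idx reverse_dict _
  unfold Spec_text_change_post
  simp only [text_change_post, text_change_post_alt]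
  obtain ⟨h1, h2⟩ := pvAgree text (PySem.Dict.ofList (reverse_dict.map fun kv => ((kv.1, kv.2.1), kv.2.2)))
      start_idx (end_idx + 1)
      (PySem.List.sorted2 (PySem.Dict.ofList (reverse_dict.map fun kv => ((kv.1, kv.2.1), kv.2.2))).keys (fun k => k.1) (fun k => k.2)) 0
  rw [h2, h1]
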